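-- pv_equiv track=rewrite | github.com/phongkhuu115/parallel_algorithm | Sum/array_sum.py | array_sum
-- ===== SOURCE A (Python) =====
-- def array_sum(arr_src):
--     arr = arr_src
--     n = len(arr)
--     if n == 1:
--         return arr[0]
--     elif n == 2:
--         return arr[0] + arr[1]
--     else:
--         mid = n // 2
--         return array_sum(arr[:mid]) + array_sum(arr[mid:])
-- ===== SOURCE B (Python) =====
-- def array_sum(arr_src):
--     total = arr_src[0]
--     for x in arr_src[1:]:
--         total += x
--     return total
-- ===== Notes on version B (the rewrite author's own statement) =====
-- stated objective: faster
-- what changed: Replaced the divide-and-conquer recursion with list slicing by a single iterative left-to-right accumulation seeded with the first element; Pre_ excludes the empty list, on which A hits RecursionError and B raises IndexError.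
import Mathlib
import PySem

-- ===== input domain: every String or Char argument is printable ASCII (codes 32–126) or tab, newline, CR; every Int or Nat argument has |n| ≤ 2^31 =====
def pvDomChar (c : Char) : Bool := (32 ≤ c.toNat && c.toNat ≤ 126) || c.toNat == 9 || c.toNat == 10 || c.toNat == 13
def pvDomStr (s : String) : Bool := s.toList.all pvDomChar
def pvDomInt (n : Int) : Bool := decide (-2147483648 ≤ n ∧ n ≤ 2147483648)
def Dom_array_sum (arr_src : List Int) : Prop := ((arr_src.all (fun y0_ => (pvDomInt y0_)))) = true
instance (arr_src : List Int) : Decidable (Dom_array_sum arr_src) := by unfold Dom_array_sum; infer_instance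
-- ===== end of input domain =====

-- B replaces A's divide-and-conquer recursion by one iterative left-to-right accumulation (objective: simpler).

-- ===== PORT A =====
-- arr[:mid] / arr[mid:] with 0 ≤ mid ≤ len(arr) are exactly take/drop, so the slices are exact here.
-- The n = 0 guard only makes the port total: Python diverges (RecursionError) on [], which Pre_ excludes.
def array_sum (arr_src : List Int) : Int :=
  let n := arr_src.length
  if n = 0 then 0
  else if n = 1 then (PySem.List.pyGet? arr_src 0).getD 0
  else if n = 2 then (PySem.List.pyGet? arr_src 0).getD 0 + (PySem.List.pyGet? arr_src 1).getD 0
  else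
    let mid := n / 2
    array_sum (arr_src.take mid) + array_sum (arr_src.drop mid)
termination_by arr_src.length
decreasing_by
  · simp only [List.length_take]; omega
  · simp only [List.length_drop]; omega

-- ===== PORT B =====
def array_sum_alt (arr_src : List Int) : Int :=
  match arr_src with
  | [] => 0   -- unreached under Pre_: the Python B raises IndexError on []
  | x :: xs => xs.foldl (· + ·) x

-- ===== PRECONDITION & SPEC =====
-- Pre_ excludes the empty list, on which A hits RecursionError (and B raises IndexError).
def Pre_array_sum (arr_src : List Int) : Prop := arr_src ≠ []
instance (arr_src : List Int) : Decidable (Pre_array_sum arr_src) := by unfold Pre_array_sum; infer_instance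
def pvWitness_array_sum : List Int := ([1, 2, 3])

def Spec_array_sum (arr_src : List Int) (out : Int) : Prop := out = array_sum_alt arr_src
instance (arr_src : List Int) (out : Int) : Decidable (Spec_array_sum arr_src out) := by unfold Spec_array_sum; infer_instance

-- ===== CLAIM (what is proved, stated in full; the proofs are below) =====
def Claim_equal_array_sum : Prop := ∀ (arr_src : List Int), Dom_array_sum arr_src → Pre_array_sum arr_src → Spec_array_sum arr_src (array_sum arr_src)

-- ===== LEMMAS AND PROOFS =====

theorem array_sum_len_eq_sum : ∀ (n : Nat) (arr : List Int), arr.length = n → array_sum arr = arr.sum := by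
  intro n
  induction n using Nat.strong_induction_on with
  | _ n ih =>
    intro arr hlen
    rw [array_sum]
    simp only []
    by_cases h0 : arr.length = 0
    · simp [List.eq_nil_of_length_eq_zero h0]
    · by_cases h1 : arr.length = 1
      · match arr, h1 with
        | [x], _ => simp [PySem.List.pyGet?, PySem.List.pyIdx?]
      · by_cases h2 : arr.length = 2
        · match arr, h2 with
          | [x, y], _ => simp [PySem.List.pyGet?, PySem.List.pyIdx?]
        · simp only [h0, h1, h2, if_false]
          rw [ih (arr.take (arr.length / 2)).length (by simp [List.length_take]; omega) _ rfl,
              ih (arr.drop (arr.length / 2)).length (by simp [List.length_drop]; omega) _ rfl,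
              ← List.sum_append, List.take_append_drop]

theorem array_sum_eq_sum (arr : List Int) : array_sum arr = arr.sum :=
  array_sum_len_eq_sum arr.length arr rfl

theorem foldl_add_eq (xs : List Int) (a : Int) : xs.foldl (· + ·) a = a + xs.sum := by
  induction xs generalizing a with
  | nil => simp
  | cons y ys ih => simp [List.foldl_cons, ih]; ring

theorem array_sum_alt_eq_sum (arr : List Int) : array_sum_alt arr = arr.sum := by
  cases arr with
  | nil => simp [array_sum_alt]
  | cons x xs => simp [array_sum_alt, foldl_add_eq]

-- ===== VERDICT (by name: the statement is the Claim_ definition above) =====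
theorem array_sum_spec : Claim_equal_array_sum := by
  intro arr _ _
  unfold Spec_array_sum
  rw [array_sum_eq_sum, array_sum_alt_eq_sum]
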